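-- pv_equiv track=rewrite | github.com/jruiz002/LAB8_TC | complexity_analyzer.py | algorithm_problem_2
-- ===== SOURCE A (Python) =====
-- def algorithm_problem_2(n):
--     """
--     Problem 2: Double nested loops with break
--     Time complexity: O(n)
--     """
--     if n <= 1:
--         return 0
--
--     counter = 0
--
--     for i in range(1, n + 1):
--         for j in range(1, n + 1):
--             counter += 1  # Simulating the printf operation
--             break  # This break makes the inner loop execute only once
--
--     return counter
-- ===== SOURCE B (Python) =====
-- def algorithm_problem_2(n):
--     """Closed form: the inner loop breaks immediately, so the double loop adds 1 exactly n times."""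
--     if n <= 1:
--         return 0
--     return n
-- ===== Notes on version B (the rewrite author's own statement) =====
-- stated objective: faster
-- what changed: Replaced the nested loop whose inner loop breaks immediately with the closed-form result n (0 for n<=1).
import Mathlib
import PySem

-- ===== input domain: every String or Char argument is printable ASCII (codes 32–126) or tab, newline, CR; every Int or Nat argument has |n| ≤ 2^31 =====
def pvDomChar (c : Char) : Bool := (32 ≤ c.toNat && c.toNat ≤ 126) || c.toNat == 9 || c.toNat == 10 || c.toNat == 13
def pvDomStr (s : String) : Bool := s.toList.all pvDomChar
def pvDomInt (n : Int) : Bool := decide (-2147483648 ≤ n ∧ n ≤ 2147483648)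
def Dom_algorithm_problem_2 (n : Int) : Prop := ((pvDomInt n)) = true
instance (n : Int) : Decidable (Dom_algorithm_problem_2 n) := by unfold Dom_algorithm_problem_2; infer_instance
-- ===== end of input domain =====

-- B replaces A's nested loop (inner loop breaks immediately) by the closed form n, for speed.


-- ===== PORT A =====
-- inner loop: 'for j in range(1, n+1): counter += 1; break' — adds 1 if the range is nonempty, then breaks
def pvInnerA (js : List Int) (c : Int) : Int :=
  match js with
  | [] => c
  | _ :: _ => c + 1

def algorithm_problem_2 (n : Int) : Int :=
  if n ≤ 1 then 0
  else
    let rng := PySem.List.pyRange 1 (n + 1) 1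
    rng.foldl (fun counter _i => pvInnerA rng counter) 0

-- ===== PORT B =====
def algorithm_problem_2_alt (n : Int) : Int :=
  if n ≤ 1 then 0 else n

-- ===== PRECONDITION & SPEC =====
def Spec_algorithm_problem_2 (n : Int) (out : Int) : Prop := out = algorithm_problem_2_alt n
instance (n : Int) (out : Int) : Decidable (Spec_algorithm_problem_2 n out) := by unfold Spec_algorithm_problem_2; infer_instance

-- ===== CLAIM (what is proved, stated in full; the proofs are below) =====
def Claim_equal_algorithm_problem_2 : Prop := ∀ (n : Int), Dom_algorithm_problem_2 n → Spec_algorithm_problem_2 n (algorithm_problem_2 n)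

-- ===== LEMMAS AND PROOFS =====
theorem pv_foldl_count {α : Type} (l : List α) (init : Int) :
    l.foldl (fun c _ => c + 1) init = init + l.length := by
  induction l generalizing init with
  | nil => simp
  | cons x xs ih => simp [List.foldl, ih]; omega

-- ===== VERDICT (by name: the statement is the Claim_ definition above) =====
theorem algorithm_problem_2_spec : Claim_equal_algorithm_problem_2 := by
  intro n _
  unfold Spec_algorithm_problem_2 algorithm_problem_2 algorithm_problem_2_alt
  by_cases h : n ≤ 1
  · simp [h]
  · rw [if_neg h, if_neg h]
    have hlt : (1 : Int) < n + 1 := by omega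
    rw [PySem.List.pyRange_one_cons hlt]
    have hfold : ∀ (l : List Int) (init : Int),
        l.foldl (fun counter _ => pvInnerA (1 :: PySem.List.pyRange (1+1) (n+1) 1) counter) init
          = l.foldl (fun c _ => c + 1) init := by
      intro l
      induction l with
      | nil => intro init; rfl
      | cons x xs ih => intro init; simp [List.foldl, pvInnerA, ih]
    rw [hfold, pv_foldl_count]
    have : PySem.List.pyRange 1 (n+1) 1 = 1 :: PySem.List.pyRange (1+1) (n+1) 1 :=
      PySem.List.pyRange_one_cons hlt
    have hlen : ((1 : Int) :: PySem.List.pyRange (1+1) (n+1) 1).length = (n + 1 - 1).toNat := by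
      rw [← this, PySem.List.length_pyRange_one]
    rw [hlen]
    omega
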